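-- pv_equiv track=rewrite | github.com/kimbackdoo/Algorithm | Python/Programmers/Level 1/두 개 뽑아서 더하기.py | solution
-- ===== SOURCE A (Python) =====
-- def solution(numbers):
--     def dfs(case, pick, idx): # dfs 정의
--         if len(case) == pick: # 뽑은 경우가 pick와 같다면
--             answer.add(sum(case)) # answer에 case의 합 추가
--             return # 재귀 탈출
--
--         for i in range(idx, len(numbers)): # numbers의 모든 요소를 순회하면서 모든 경우 탐색
--             dfs(case + [numbers[i]], pick, i + 1) # dfs 탐색
--
--     answer = set()
--     dfs([], 2, 0)
--     return sorted(answer)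
-- ===== SOURCE B (Python) =====
-- def solution(numbers):
--     sums = set()
--     n = len(numbers)
--     for i in range(n):
--         for j in range(i + 1, n):
--             sums.add(numbers[i] + numbers[j])
--     return sorted(sums)
-- ===== Notes on version B (the rewrite author's own statement) =====
-- stated objective: simpler
-- what changed: Replaces the recursive dfs combination enumerator (building case lists and a closure over answer) with a flat double index loop that adds each pair sum to a set directly.
import Mathlib
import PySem

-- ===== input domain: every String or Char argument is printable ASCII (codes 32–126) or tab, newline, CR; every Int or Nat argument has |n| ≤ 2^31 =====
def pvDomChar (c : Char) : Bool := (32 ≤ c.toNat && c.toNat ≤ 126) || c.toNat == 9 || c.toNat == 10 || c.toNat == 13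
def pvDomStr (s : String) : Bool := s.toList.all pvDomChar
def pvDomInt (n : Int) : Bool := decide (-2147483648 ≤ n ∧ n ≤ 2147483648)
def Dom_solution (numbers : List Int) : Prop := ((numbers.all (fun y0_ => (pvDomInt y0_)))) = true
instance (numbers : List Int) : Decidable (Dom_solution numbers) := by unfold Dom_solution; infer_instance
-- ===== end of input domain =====

-- B replaces A's recursive dfs combination enumerator with a flat double index loop over a set (objective: simpler).

-- ===== PORT A =====
-- A's inner dfs (answer threaded as an explicit PySem.Set accumulator; the
-- 'for i in range(idx, len(numbers))' loop is the mutual helper solutionLoopA;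
-- Python's idx/i are always the nonnegative loop counters, kept as Nat).
mutual
def solutionDfsA (nums : List Int) (cs : List Int) (pick : Nat) (idx : Nat)
    (ans : PySem.Set Int) : PySem.Set Int :=
  if cs.length = pick then PySem.Set.add ans cs.sum
  else solutionLoopA nums cs pick idx ans
termination_by 2 * (nums.length + 1 - idx) + 1

def solutionLoopA (nums : List Int) (cs : List Int) (pick : Nat) (i : Nat)
    (ans : PySem.Set Int) : PySem.Set Int :=
  if h : i < nums.length then
    solutionLoopA nums cs pick (i + 1)
      (solutionDfsA nums (cs ++ [nums[i]]) pick (i + 1) ans)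
  else ans
termination_by 2 * (nums.length + 1 - i)
decreasing_by · omega
              · omega
end

def solution (numbers : List Int) : List Int :=
  PySem.List.sorted (solutionDfsA numbers [] 2 0 PySem.Set.empty) (fun x => x) false

-- ===== PORT B =====
def solution_alt (numbers : List Int) : List Int :=
  let n : Int := numbers.length
  let sums : PySem.Set Int :=
    (PySem.List.pyRange 0 n 1).foldl (fun s i =>
      (PySem.List.pyRange (i + 1) n 1).foldl (fun s j =>
        PySem.Set.add s (PySem.List.pyGetD numbers i 0 + PySem.List.pyGetD numbers j 0)) s)
      PySem.Set.empty
  PySem.List.sorted sums (fun x => x) false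

-- ===== PRECONDITION & SPEC =====
def Spec_solution (numbers : List Int) (out : List Int) : Prop := out = solution_alt numbers
instance (numbers : List Int) (out : List Int) : Decidable (Spec_solution numbers out) := by unfold Spec_solution; infer_instance

-- ===== CLAIM (what is proved, stated in full; the proofs are below) =====
def Claim_equal_solution : Prop := ∀ (numbers : List Int), Dom_solution numbers → Spec_solution numbers (solution numbers)

-- ===== LEMMAS AND PROOFS =====

-- A's level-2 loop (case = [x]) is B's inner fold over range(i, n).
lemma loopA_level2 (nums : List Int) (x : Int) (i : Nat) (ans : PySem.Set Int) :
    solutionLoopA nums [x] 2 i ans =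
      (PySem.List.pyRange (i : Int) nums.length 1).foldl
        (fun s j => PySem.Set.add s (x + PySem.List.pyGetD nums j 0)) ans := by
  induction hn : nums.length - i generalizing i ans with
  | zero =>
    rw [solutionLoopA, dif_neg (by omega),
      PySem.List.pyRange_one_eq_nil (by exact_mod_cast Nat.le_of_sub_eq_zero hn)]
    rfl
  | succ k ih =>
    have h : i < nums.length := by omega
    rw [solutionLoopA, dif_pos h, solutionDfsA, if_pos (by simp),
      PySem.List.pyRange_one_cons (by exact_mod_cast h), List.foldl_cons,
      ih (i + 1) _ (by omega)]
    push_cast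
    simp [pysem, List.getElem?_eq_getElem h]

-- A's level-1 loop (case = []) is B's outer fold over range(i, n).
lemma loopA_level1 (nums : List Int) (i : Nat) (ans : PySem.Set Int) :
    solutionLoopA nums [] 2 i ans =
      (PySem.List.pyRange (i : Int) nums.length 1).foldl (fun s i =>
        (PySem.List.pyRange (i + 1) nums.length 1).foldl (fun s j =>
          PySem.Set.add s (PySem.List.pyGetD nums i 0 + PySem.List.pyGetD nums j 0)) s) ans := by
  induction hn : nums.length - i generalizing i ans with
  | zero =>
    rw [solutionLoopA, dif_neg (by omega),
      PySem.List.pyRange_one_eq_nil (by exact_mod_cast Nat.le_of_sub_eq_zero hn)]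
    rfl
  | succ k ih =>
    have h : i < nums.length := by omega
    rw [solutionLoopA, dif_pos h, solutionDfsA, if_neg (by simp),
      PySem.List.pyRange_one_cons (by exact_mod_cast h), List.foldl_cons]
    simp only [List.nil_append]
    rw [loopA_level2, ih (i + 1) _ (by omega)]
    push_cast
    simp [pysem, List.getElem?_eq_getElem h]

-- ===== VERDICT (by name: the statement is the Claim_ definition above) =====
theorem solution_spec : Claim_equal_solution := by
  intro numbers _
  unfold Spec_solution solution solution_alt
  rw [solutionDfsA]
  simp only [List.length_nil]
  rw [if_neg (by omega)]
  rw [loopA_level1]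
  norm_num
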